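-- pv_equiv track=rewrite | github.com/smart0120/veritas-rl | train/tools/openspiel_adapter.py | _filter_cases_by_game_types
-- ===== SOURCE A (Python) =====
-- from typing import Any, Dict, List, Optional, Tuple
--
-- def _filter_cases_by_game_types(cases: List[str], game_types: List[str]) -> List[str]:
--     """Keep only cases that match game_types. If game_types is empty, return cases unchanged.
--     Each entry in game_types can be a game short name (e.g. 'hex', 'go') or a full case string (e.g. 'hex(board_size=5)').
--     A case matches if it equals an entry or starts with entry + '(' (so 'hex' matches 'hex(board_size=5)').
--     """
--     if not game_types:
--         return cases
--     out: List[str] = []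
--     for c in cases:
--         for gt in game_types:
--             gt = (gt or "").strip()
--             if not gt:
--                 continue
--             if c == gt or c.startswith(gt + "("):
--                 out.append(c)
--                 break
--     return out
-- ===== SOURCE B (Python) =====
-- def _filter_cases_by_game_types(cases, game_types):
--     if not game_types:
--         return cases
--     names = {g for g in (gt.strip() for gt in game_types) if g}
--     out = []
--     for c in cases:
--         if c in names:
--             out.append(c)
--         else:
--             for i, ch in enumerate(c):
--                 if ch == '(' and c[:i] in names:
--                     out.append(c)
--                     break
--     return out
-- ===== Notes on version B (the rewrite author's own statement) =====
-- stated objective: faster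
-- what changed: Replaces the inner scan over all game_types by one pre-built set of stripped names with O(1) lookups, checking the case itself and each of its '('-prefixes against the set.
import Mathlib
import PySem

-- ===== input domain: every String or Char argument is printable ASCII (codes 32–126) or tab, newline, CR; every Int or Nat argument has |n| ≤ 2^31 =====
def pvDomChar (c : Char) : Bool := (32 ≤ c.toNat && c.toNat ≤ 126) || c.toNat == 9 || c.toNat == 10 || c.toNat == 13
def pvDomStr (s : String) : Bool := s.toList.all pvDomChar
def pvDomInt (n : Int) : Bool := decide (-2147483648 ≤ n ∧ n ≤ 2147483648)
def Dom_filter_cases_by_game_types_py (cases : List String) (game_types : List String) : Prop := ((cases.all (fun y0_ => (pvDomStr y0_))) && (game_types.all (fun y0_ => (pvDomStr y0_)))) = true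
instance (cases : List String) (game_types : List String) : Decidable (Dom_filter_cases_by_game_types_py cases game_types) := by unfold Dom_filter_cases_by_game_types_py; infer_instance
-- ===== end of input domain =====

-- B replaces A's inner scan over game_types by a pre-built set of stripped names,
-- checking the case and each of its '('-prefixes by set lookup (objective: faster).

-- ===== PORT A =====
-- inner 'for gt in game_types: … break' loop of A, returning whether c was appended
def pvAMatch (c : String) : List String → Bool
  | [] => false
  | gt :: rest =>
    let g := PySem.Str.strip gt
    if g == "" then pvAMatch c rest
    else if c == g || PySem.Str.startswith c (g ++ "(") then true
    else pvAMatch c rest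

def filter_cases_by_game_types_py (cases : List String) (game_types : List String) : List String :=
  if game_types == [] then cases
  else cases.foldl (fun out c => if pvAMatch c game_types then out ++ [c] else out) []

-- ===== PORT B =====
-- B's inner scan 'for i, ch in enumerate(c): if ch == '(' and c[:i] in names';
-- pre is the accumulated prefix c[:i]
def pvBScan (names : PySem.Set String) : List Char → List Char → Bool
  | _, [] => false
  | pre, ch :: rs =>
    if ch == '(' && PySem.Set.contains names (String.ofList pre) then true
    else pvBScan names (pre ++ [ch]) rs

def filter_cases_by_game_types_py_alt (cases : List String) (game_types : List String) : List String :=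
  if game_types == [] then cases
  else
    let names : PySem.Set String :=
      PySem.Set.ofList (game_types.filterMap (fun gt =>
        let g := PySem.Str.strip gt; if g == "" then none else some g))
    cases.foldl (fun out c =>
      if PySem.Set.contains names c then out ++ [c]
      else if pvBScan names [] c.toList then out ++ [c]
      else out) []

-- ===== PRECONDITION & SPEC =====
def Spec_filter_cases_by_game_types_py (cases : List String) (game_types : List String) (out : List String) : Prop := out = filter_cases_by_game_types_py_alt cases game_types
instance (cases : List String) (game_types : List String) (out : List String) : Decidable (Spec_filter_cases_by_game_types_py cases game_types out) := by unfold Spec_filter_cases_by_game_types_py; infer_instance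

-- ===== CLAIM (what is proved, stated in full; the proofs are below) =====
def Claim_equal_filter_cases_by_game_types_py : Prop := ∀ (cases : List String) (game_types : List String), Dom_filter_cases_by_game_types_py cases game_types → Spec_filter_cases_by_game_types_py cases game_types (filter_cases_by_game_types_py cases game_types)

-- ===== LEMMAS AND PROOFS =====

-- the stripped non-empty names built from game_types
def pvNames (game_types : List String) : PySem.Set String :=
  PySem.Set.ofList (game_types.filterMap (fun gt =>
    let g := PySem.Str.strip gt; if g == "" then none else some g))

lemma mem_pvNames (game_types : List String) (x : String) :
    x ∈ pvNames game_types ↔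
      ∃ gt ∈ game_types, PySem.Str.strip gt ≠ "" ∧ x = PySem.Str.strip gt := by
  simp only [pvNames, PySem.Set.mem_ofList, List.mem_filterMap]
  constructor
  · rintro ⟨gt, hgt, h⟩
    by_cases hg : PySem.Str.strip gt = "" <;> simp [hg] at h
    exact ⟨gt, hgt, hg, h.symm⟩
  · rintro ⟨gt, hgt, hg, hx⟩
    exact ⟨gt, hgt, by simp [hg, hx]⟩

lemma pvAMatch_iff (c : String) (gts : List String) :
    pvAMatch c gts = true ↔
      ∃ gt ∈ gts, PySem.Str.strip gt ≠ "" ∧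
        (c == PySem.Str.strip gt || PySem.Str.startswith c (PySem.Str.strip gt ++ "(")) = true := by
  induction gts with
  | nil => simp [pvAMatch]
  | cons gt rest ih =>
    simp only [pvAMatch]
    by_cases hg : PySem.Str.strip gt = ""
    · rw [if_pos (by simpa using hg), ih]
      constructor
      · rintro ⟨g, hm, hne, hc⟩; exact ⟨g, List.mem_cons_of_mem _ hm, hne, hc⟩
      · rintro ⟨g, hm, hne, hc⟩
        rcases List.mem_cons.mp hm with rfl | hm'
        · exact absurd hg hne
        · exact ⟨g, hm', hne, hc⟩
    · rw [if_neg (by simpa using hg)]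
      by_cases hm : (c == PySem.Str.strip gt || PySem.Str.startswith c (PySem.Str.strip gt ++ "(")) = true
      · rw [if_pos hm]
        exact ⟨fun _ => ⟨gt, List.mem_cons_self, hg, hm⟩, fun _ => rfl⟩
      · rw [if_neg hm, ih]
        constructor
        · rintro ⟨g, hmem, hne, hc⟩; exact ⟨g, List.mem_cons_of_mem _ hmem, hne, hc⟩
        · rintro ⟨g, hmem, hne, hc⟩
          rcases List.mem_cons.mp hmem with rfl | hmem'
          · exact absurd hc hm
          · exact ⟨g, hmem', hne, hc⟩

lemma pvBScan_iff (names : PySem.Set String) (pre rest : List Char) :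
    pvBScan names pre rest = true ↔
      ∃ p q, rest = p ++ '(' :: q ∧ String.ofList (pre ++ p) ∈ names := by
  induction rest generalizing pre with
  | nil => simp [pvBScan]
  | cons ch rs ih =>
    simp only [pvBScan]
    by_cases h : (ch == '(' && PySem.Set.contains names (String.ofList pre)) = true
    · rw [if_pos h]
      simp only [Bool.and_eq_true, beq_iff_eq] at h
      refine ⟨fun _ => ⟨[], rs, by simp [h.1], ?_⟩, fun _ => rfl⟩
      simpa [PySem.Set.contains, List.contains_iff_mem] using h.2
    · rw [if_neg h, ih]
      constructor
      · rintro ⟨p, q, hrs, hmem⟩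
        exact ⟨ch :: p, q, by simp [hrs], by simpa using hmem⟩
      · rintro ⟨p, q, hpq, hmem⟩
        cases p with
        | nil =>
          exfalso
          simp only [List.nil_append, List.cons.injEq] at hpq
          simp only [List.append_nil] at hmem
          exact h (by simp [hpq.1, PySem.Set.contains, hmem])
        | cons x p' =>
          simp only [List.cons_append, List.cons.injEq] at hpq
          exact ⟨p', q, hpq.2, by simpa [hpq.1] using hmem⟩

-- the two per-case predicates agree
lemma pred_eq (c : String) (gts : List String) :
    pvAMatch c gts =
      (PySem.Set.contains (pvNames gts) c || pvBScan (pvNames gts) [] c.toList) := by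
  rcases hA : pvAMatch c gts with _ | _
  · symm
    rw [Bool.or_eq_false_iff]
    constructor
    · rw [← Bool.not_eq_true]
      intro hc
      have hmem : c ∈ pvNames gts := by
        simpa [PySem.Set.contains, List.contains_iff_mem] using hc
      rw [mem_pvNames] at hmem
      obtain ⟨gt, hgt, hne, hceq⟩ := hmem
      have : pvAMatch c gts = true :=
        (pvAMatch_iff c gts).mpr ⟨gt, hgt, hne, by simp [hceq]⟩
      simp [hA] at this
    · rw [← Bool.not_eq_true]
      intro hs
      obtain ⟨p, q, hdec, hmem⟩ := (pvBScan_iff _ _ _).mp hs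
      simp only [List.nil_append] at hmem
      rw [mem_pvNames] at hmem
      obtain ⟨gt, hgt, hne, hpe⟩ := hmem
      have hp : (PySem.Str.strip gt).toList = p := by simp [← hpe]
      have hsw : PySem.Str.startswith c (PySem.Str.strip gt ++ "(") = true := by
        simp only [PySem.Str.startswith_eq]
        rw [PySem.Chars.startswith_iff]
        exact ⟨q, by simp [hp, hdec]⟩
      have : pvAMatch c gts = true :=
        (pvAMatch_iff c gts).mpr ⟨gt, hgt, hne, by rw [Bool.or_eq_true]; exact Or.inr hsw⟩
      simp [hA] at this
  · symm
    rw [Bool.or_eq_true]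
    obtain ⟨gt, hgt, hne, hc⟩ := (pvAMatch_iff c gts).mp hA
    by_cases hce : c = PySem.Str.strip gt
    · left
      simp [PySem.Set.contains, (mem_pvNames gts _).mpr ⟨gt, hgt, hne, hce⟩]
    · right
      have hsw : PySem.Str.startswith c (PySem.Str.strip gt ++ "(") = true := by
        simpa [hce] using hc
      rw [pvBScan_iff]
      simp only [PySem.Str.startswith_eq] at hsw
      rw [PySem.Chars.startswith_iff] at hsw
      obtain ⟨q, hq⟩ := hsw
      refine ⟨(PySem.Str.strip gt).toList, q, by simpa using hq.symm, ?_⟩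
      simp only [List.nil_append]
      have hx : String.ofList (PySem.Str.strip gt).toList = PySem.Str.strip gt :=
        String.ofList_toList
      rw [hx]
      exact (mem_pvNames gts _).mpr ⟨gt, hgt, hne, rfl⟩

-- ===== VERDICT (by name: the statement is the Claim_ definition above) =====
theorem filter_cases_by_game_types_py_spec : Claim_equal_filter_cases_by_game_types_py := by
  intro cases game_types _
  unfold Spec_filter_cases_by_game_types_py
  unfold filter_cases_by_game_types_py filter_cases_by_game_types_py_alt
  by_cases h : game_types = []
  · simp [h]
  · rw [if_neg (by simpa using h), if_neg (by simpa using h)]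
    have hfun : (fun (out : List String) (c : String) =>
        if pvAMatch c game_types then out ++ [c] else out) =
        (fun (out : List String) (c : String) =>
          if PySem.Set.contains (pvNames game_types) c then out ++ [c]
          else if pvBScan (pvNames game_types) [] c.toList then out ++ [c]
          else out) := by
      funext out c
      rw [pred_eq c game_types]
      rcases h1 : PySem.Set.contains (pvNames game_types) c <;>
        rcases h2 : pvBScan (pvNames game_types) [] c.toList <;> simp
    show cases.foldl _ [] = cases.foldl _ []
    rw [hfun]
    rfl
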